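-- pv_equiv track=rewrite | github.com/arthexis/gway | gway/console.py | _looks_like_context
-- ===== SOURCE A (Python) =====
-- def _looks_like_context(tokens: list[str]) -> bool:
--     """Return ``True`` when *tokens* resemble ``--key value`` pairs.
--
--     The helper mirrors :func:`parse_recipe_context` without mutating the
--     tokens or raising ``SystemExit`` on malformed input so callers can decide
--     whether to treat the arguments as free-form context instead of a command.
--     """
--
--     if not tokens:
--         return False
--
--     length = len(tokens)
--     index = 0
--
--     while index < length:
--         token = tokens[index]
--         if not token.startswith("--") or len(token) <= 2:
--             return False
--
--         index += 1
--         if index < length and not tokens[index].startswith("--"):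
--             index += 1
--             if index < length and not tokens[index].startswith("--"):
--                 return False
--
--     return True
-- ===== SOURCE B (Python) =====
-- def _looks_like_context(tokens: list[str]) -> bool:
--     """Single forward pass with a boolean flag instead of index look-ahead."""
--     if not tokens or not tokens[0].startswith("--"):
--         return False
--     prev_was_value = False
--     for token in tokens:
--         if token.startswith("--"):
--             if len(token) <= 2:
--                 return False
--             prev_was_value = False
--         else:
--             if prev_was_value:
--                 return False
--             prev_was_value = True
--     return True
-- ===== Notes on version B (the rewrite author's own statement) =====
-- stated objective: idiomatic
-- what changed: Replaces the index-jumping while-loop with look-ahead by a single for-loop over tokens threading a prev_was_value flag (plus one upfront check on the first token).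
import Mathlib
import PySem

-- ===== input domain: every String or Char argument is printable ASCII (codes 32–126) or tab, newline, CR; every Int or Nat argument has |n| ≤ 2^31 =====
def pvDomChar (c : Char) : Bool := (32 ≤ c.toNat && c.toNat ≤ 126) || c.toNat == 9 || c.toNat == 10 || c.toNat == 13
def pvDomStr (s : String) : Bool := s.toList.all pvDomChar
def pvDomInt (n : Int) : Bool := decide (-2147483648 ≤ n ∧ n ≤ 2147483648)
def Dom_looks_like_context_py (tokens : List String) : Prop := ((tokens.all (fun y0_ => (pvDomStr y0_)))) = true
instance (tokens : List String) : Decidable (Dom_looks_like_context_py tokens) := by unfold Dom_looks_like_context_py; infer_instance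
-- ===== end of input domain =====

-- B replaces A's index-jumping while-loop by one for-loop threading a prev_was_value flag (idiomatic; return value only).
-- ===== PORT A =====
-- the while loop of A: `index` jumps by 1 or 2; terminates since tokens.length - index shrinks
def llcA_loop (tokens : List String) (index : Nat) : Bool :=
  if index < tokens.length then
    let token := tokens.getD index ""
    if ¬ PySem.Str.startswith token "--" ∨ PySem.Str.len token ≤ 2 then false
    else
      let i1 := index + 1
      if i1 < tokens.length ∧ ¬ PySem.Str.startswith (tokens.getD i1 "") "--" then
        let i2 := i1 + 1
        if i2 < tokens.length ∧ ¬ PySem.Str.startswith (tokens.getD i2 "") "--" then false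
        else llcA_loop tokens i2
      else llcA_loop tokens i1
  else true
termination_by tokens.length - index

def looks_like_context_py (tokens : List String) : Bool :=
  if tokens = [] then false
  else llcA_loop tokens 0

-- ===== PORT B =====
-- B's for-loop over the tokens, carrying the prev_was_value flag
def llcB_loop : List String → Bool → Bool
  | [], _ => true
  | token :: rest, prev_was_value =>
    if PySem.Str.startswith token "--" then
      if PySem.Str.len token ≤ 2 then false
      else llcB_loop rest false
    else
      if prev_was_value then false
      else llcB_loop rest true

def looks_like_context_py_alt (tokens : List String) : Bool :=
  match tokens with
  | [] => false
  | t :: _ =>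
    if ¬ PySem.Str.startswith t "--" then false
    else llcB_loop tokens false

-- ===== PRECONDITION & SPEC =====
def Spec_looks_like_context_py (tokens : List String) (out : Bool) : Prop := out = looks_like_context_py_alt tokens
instance (tokens : List String) (out : Bool) : Decidable (Spec_looks_like_context_py tokens out) := by unfold Spec_looks_like_context_py; infer_instance

-- ===== CLAIM (what is proved, stated in full; the proofs are below) =====
def Claim_equal_looks_like_context_py : Prop := ∀ (tokens : List String), Dom_looks_like_context_py tokens → Spec_looks_like_context_py tokens (looks_like_context_py tokens)

-- ===== LEMMAS AND PROOFS =====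

-- ===== VERDICT (by name: the statement is the Claim_ definition above) =====
-- key invariant: at every re-entry of A's while loop, either index is past the end or
-- tokens[index] starts with "--"; there llcA_loop equals B's flag-loop on the remaining tokens with flag false.
theorem llcA_eq_llcB (tokens : List String) (index : Nat)
    (h : tokens.length ≤ index ∨ PySem.Str.startswith (tokens.getD index "") "--" = true) :
    llcA_loop tokens index = llcB_loop (tokens.drop index) false := by
  induction hk : tokens.length - index using Nat.strong_induction_on generalizing index with
  | _ k ih =>
  subst hk
  by_cases hlt : index < tokens.length
  · have hd : tokens.drop index = tokens[index] :: tokens.drop (index + 1) :=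
      List.drop_eq_getElem_cons hlt
    have hget : tokens.getD index "" = tokens[index] := List.getD_eq_getElem tokens "" hlt
    have hs : PySem.Str.startswith tokens[index] "--" = true := by
      rcases h with h | h
      · omega
      · rwa [hget] at h
    rw [llcA_loop]
    simp only [hlt, if_true, hget, hd]
    by_cases hlen : PySem.Str.len tokens[index] ≤ 2
    · rw [if_pos (Or.inr hlen), llcB_loop, if_pos hs, if_pos hlen]
    · rw [if_neg (by simp only [not_or, not_not, not_le]; exact ⟨hs, by omega⟩)]
      rw [llcB_loop, if_pos hs, if_neg hlen]
      by_cases c1 : index + 1 < tokens.length ∧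
          ¬ PySem.Str.startswith (tokens.getD (index + 1) "") "--" = true
      · rw [if_pos c1]
        obtain ⟨h1lt, h1s⟩ := c1
        have hd1 : tokens.drop (index + 1) = tokens[index + 1] :: tokens.drop (index + 2) :=
          List.drop_eq_getElem_cons h1lt
        rw [List.getD_eq_getElem tokens "" h1lt] at h1s
        rw [hd1, llcB_loop, if_neg h1s, if_neg Bool.false_ne_true]
        by_cases c2 : index + 2 < tokens.length ∧
            ¬ PySem.Str.startswith (tokens.getD (index + 2) "") "--" = true
        · rw [if_pos c2]
          obtain ⟨h2lt, h2s⟩ := c2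
          have hd2 : tokens.drop (index + 2) = tokens[index + 2] :: tokens.drop (index + 3) :=
            List.drop_eq_getElem_cons h2lt
          rw [List.getD_eq_getElem tokens "" h2lt] at h2s
          rw [hd2, llcB_loop, if_neg h2s, if_pos rfl]
        · rw [if_neg c2]
          rw [ih (tokens.length - (index + 2)) (by omega) (index + 2)
            (by push Not at c2
                by_cases hl : index + 2 < tokens.length
                · exact Or.inr (c2 hl)
                · exact Or.inl (by omega)) rfl]
          by_cases hl2 : index + 2 < tokens.length
          · have hd2 : tokens.drop (index + 2) = tokens[index + 2] :: tokens.drop (index + 3) :=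
              List.drop_eq_getElem_cons hl2
            have h2s : PySem.Str.startswith tokens[index + 2] "--" = true := by
              push Not at c2
              have := c2 hl2
              rwa [List.getD_eq_getElem tokens "" hl2] at this
            rw [hd2, llcB_loop, llcB_loop, if_pos h2s, if_pos h2s]
          · rw [List.drop_eq_nil_of_le (by omega), llcB_loop, llcB_loop]
      · rw [if_neg c1]
        exact ih (tokens.length - (index + 1)) (by omega) (index + 1)
          (by push Not at c1
              by_cases hl : index + 1 < tokens.length
              · exact Or.inr (c1 hl)
              · exact Or.inl (by omega)) rfl
  · rw [llcA_loop]
    simp only [hlt, if_false]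
    rw [List.drop_eq_nil_of_le (by omega), llcB_loop]

theorem looks_like_context_py_spec : Claim_equal_looks_like_context_py := by
  intro tokens _
  unfold Spec_looks_like_context_py looks_like_context_py looks_like_context_py_alt
  match tokens with
  | [] => simp
  | t :: rest =>
    simp only [reduceCtorEq, if_false]
    by_cases hs : PySem.Str.startswith t "--" = true
    · rw [if_neg (by simp [PySem.Str.startswith_eq] at hs ⊢; exact hs)]
      have := llcA_eq_llcB (t :: rest) 0 (Or.inr hs)
      simpa using this
    · rw [if_pos (by simp [PySem.Str.startswith_eq] at hs ⊢; simpa using hs)]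
      rw [llcA_loop]
      simp only [List.getD]
      simp [PySem.Str.startswith_eq] at hs
      simp [hs]
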